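-- pv_equiv track=rewrite | github.com/middlefitting/Algorithm-DataStructure | Solved/프로그래머스/고득점kit/스택큐/주식가격.py | solution
-- ===== SOURCE A (Python) =====
-- from collections import deque
--
-- def solution(prices):
--     answer = [0] * len(prices)
--     queue = deque(prices)
--     save = deque()
--
--     idx = -1
--     while queue:
--         idx += 1
--         temp = queue.popleft()
--         while save:
--             top = save.popleft()
--             if top[0] <= temp:
--                 save.appendleft(top)
--                 break
--             else:
--                 answer[top[1]] = idx - top[1]
--         save.appendleft([temp, idx])
--
--     while save:
--         top = save.popleft()
--         answer[top[1]] = idx - top[1]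
--     return answer
-- ===== SOURCE B (Python) =====
-- def solution(prices):
--     n = len(prices)
--     answer = []
--     for i in range(n):
--         count = 0
--         for j in range(i + 1, n):
--             count += 1
--             if prices[j] < prices[i]:
--                 break
--         answer.append(count)
--     return answer
-- ===== Notes on version B (the rewrite author's own statement) =====
-- stated objective: simpler
-- what changed: Replaces the deque-based monotonic-stack bookkeeping (stack of pending indices, deferred answer writes, final flush) with a direct two-loop simulation that scans forward from each index until a strictly lower price.
import Mathlib
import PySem

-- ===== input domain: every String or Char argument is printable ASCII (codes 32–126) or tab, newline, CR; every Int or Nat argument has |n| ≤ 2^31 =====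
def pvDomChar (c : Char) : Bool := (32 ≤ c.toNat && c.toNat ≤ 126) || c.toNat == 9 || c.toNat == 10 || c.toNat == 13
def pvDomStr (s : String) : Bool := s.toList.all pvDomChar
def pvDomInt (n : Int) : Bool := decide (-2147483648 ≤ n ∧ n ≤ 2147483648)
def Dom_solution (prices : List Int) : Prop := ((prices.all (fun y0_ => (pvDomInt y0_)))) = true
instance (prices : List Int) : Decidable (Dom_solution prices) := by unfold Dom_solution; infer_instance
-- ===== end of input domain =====

-- B replaces A's deque-based monotonic-stack bookkeeping with a plain two-loop
-- forward scan (simpler); equivalence of the two algorithms is proved below.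

-- ===== PORT A =====
-- the `idx` counter paired with each dequeued price (idx starts at -1, +1 each turn)
def withIdx (i : Nat) : List Int → List (Int × Int)
  | [] => []
  | p :: rest => (p, (i : Int)) :: withIdx (i + 1) rest

-- inner `while save:` loop: pop entries with top[0] > temp, writing answer[top[1]] = idx - top[1]
def popA (temp idx : Int) : List (Int × Int) → List Int → List (Int × Int) × List Int
  | [], ans => ([], ans)
  | (p, i) :: rest, ans =>
    if p ≤ temp then ((p, i) :: rest, ans)
    else popA temp idx rest (ans.set i.toNat (idx - i))

-- outer `while queue:` loop
def mainA : List (Int × Int) → List (Int × Int) → List Int → List (Int × Int) × List Int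
  | [], save, ans => (save, ans)
  | (temp, idx) :: qs, save, ans =>
    let r := popA temp idx save ans
    mainA qs ((temp, idx) :: r.1) r.2

-- trailing `while save:` flush
def flushA (idx : Int) : List (Int × Int) → List Int → List Int
  | [], ans => ans
  | (_, i) :: rest, ans => flushA idx rest (ans.set i.toNat (idx - i))

def solution (prices : List Int) : List Int :=
  let n := prices.length
  let r := mainA (withIdx 0 prices) [] (List.replicate n 0)
  flushA ((n : Int) - 1) r.1 r.2

-- ===== PORT B =====
-- inner j-loop of Source B: count += 1 each step, break on a strictly lower price
def countDays (p : Int) : List Int → Int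
  | [] => 0
  | q :: rest => if q < p then 1 else 1 + countDays p rest

-- outer i-loop of Source B: one count per position
def solution_alt : List Int → List Int
  | [] => []
  | p :: rest => countDays p rest :: solution_alt rest

-- ===== PRECONDITION & SPEC =====
def Spec_solution (prices : List Int) (out : List Int) : Prop := out = solution_alt prices
instance (prices : List Int) (out : List Int) : Decidable (Spec_solution prices out) := by unfold Spec_solution; infer_instance

-- ===== CLAIM (what is proved, stated in full; the proofs are below) =====
def Claim_equal_solution : Prop := ∀ (prices : List Int), Dom_solution prices → Spec_solution prices (solution prices)

-- ===== LEMMAS AND PROOFS =====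

-- the value B computes at index i
def expected (prices : List Int) (i : Nat) : Int := countDays prices[i]! (prices.drop (i + 1))

-- "no strictly lower price strictly between i and k"
abbrev Good (prices : List Int) (k i : Nat) : Prop := ∀ m, i < m → m < k → prices[i]! ≤ prices[m]!

-- getElem! / getElem bridges
theorem getbang_eq {l : List Int} {i : Nat} (h : i < l.length) : l[i]! = l[i] := by
  simp [List.getElem!_eq_getElem?_getD, List.getElem?_eq_getElem h]

theorem getbang_drop {l : List Int} {i j : Nat} (h : i + j < l.length) :
    (l.drop i)[j]! = l[i + j]! := by
  have hj : j < (l.drop i).length := by simp [List.length_drop]; omega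
  rw [getbang_eq hj, getbang_eq h, List.getElem_drop]

-- countDays characterisations
theorem countDays_found (p : Int) :
    ∀ (l : List Int) (j : Nat), j < l.length → (∀ m, m < j → p ≤ l[m]!) → l[j]! < p →
      countDays p l = (j : Int) + 1 := by
  intro l
  induction l with
  | nil => intro j hj; simp at hj
  | cons q rest ih =>
    intro j hj hge hlt
    cases j with
    | zero =>
      simp at hlt
      simp [countDays, hlt]
    | succ j' =>
      have hq : p ≤ q := by
        have := hge 0 (Nat.succ_pos _)
        simpa [getbang_eq (by simp : (0:Nat) < (q :: rest).length)] using this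
      have hrec : countDays p rest = (j' : Int) + 1 := by
        apply ih j' (by simpa using hj)
        · intro m hm
          have := hge (m+1) (by omega)
          have hmlen : m < rest.length := by simp at hj; omega
          simpa [getbang_eq (show m+1 < (q::rest).length by simp; omega),
            getbang_eq hmlen] using this
        · have hjlen : j' < rest.length := by simpa using hj
          simpa [getbang_eq (show j'+1 < (q::rest).length by simp; omega),
            getbang_eq hjlen] using hlt
      simp [countDays, not_lt.mpr hq, hrec]
      ring

theorem countDays_none (p : Int) :
    ∀ (l : List Int), (∀ m, m < l.length → p ≤ l[m]!) → countDays p l = (l.length : Int) := by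
  intro l
  induction l with
  | nil => intro _; simp [countDays]
  | cons q rest ih =>
    intro hge
    have hq : p ≤ q := by
      have := hge 0 (by simp)
      simpa [getbang_eq (by simp : (0:Nat) < (q :: rest).length)] using this
    have hrec := ih (fun m hm => by
      have := hge (m+1) (by simp; omega)
      simpa [getbang_eq (show m+1 < (q::rest).length by simp; omega), getbang_eq hm] using this)
    simp [countDays, not_lt.mpr hq, hrec]
    ring

theorem expected_found {prices : List Int} {i k : Nat} (hik : i < k) (hk : k < prices.length)
    (hg : Good prices k i) (hd : prices[k]! < prices[i]!) :
    expected prices i = (k : Int) - (i : Int) := by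
  unfold expected
  have hlen : k - (i+1) < (prices.drop (i+1)).length := by simp [List.length_drop]; omega
  have := countDays_found prices[i]! (prices.drop (i+1)) (k - (i+1)) hlen
    (fun m hm => by
      rw [getbang_drop (show i+1+m < prices.length by omega)]
      exact hg (i+1+m) (by omega) (by omega))
    (by rw [getbang_drop (show i+1+(k-(i+1)) < prices.length by omega)]
        have : i+1+(k-(i+1)) = k := by omega
        rw [this]; exact hd)
  rw [this]; omega

theorem expected_none {prices : List Int} {i : Nat} (hi : i < prices.length)
    (hg : Good prices prices.length i) :
    expected prices i = (prices.length : Int) - 1 - (i : Int) := by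
  unfold expected
  have := countDays_none prices[i]! (prices.drop (i+1))
    (fun m hm => by
      have hm' : m < prices.length - (i+1) := by simpa [List.length_drop] using hm
      rw [getbang_drop (show i+1+m < prices.length by omega)]
      exact hg (i+1+m) (by omega) (by omega))
  rw [this]; simp [List.length_drop]; push_cast [Nat.cast_sub (by omega : i+1 ≤ prices.length)]
  omega

-- stack invariants
abbrev Stk (save : List (Int × Int)) : Prop :=
  List.Pairwise (fun a b => b.1 ≤ a.1 ∧ b.2 < a.2) save

abbrev Out (prices : List Int) (k : Nat) (save : List (Int × Int)) (ans : List Int) : Prop :=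
  ans.length = prices.length ∧
  ∀ i : Nat, i < prices.length →
    ans[i]? = if ((i : Int) ∈ save.map Prod.snd ∨ k ≤ i) then some 0 else some (expected prices i)

theorem popA_spec {prices : List Int} {k : Nat} (hk : k < prices.length) :
    ∀ (save : List (Int × Int)) (ans : List Int),
    Stk save →
    (∀ e ∈ save, ∃ i : Nat, e = (prices[i]!, (i : Int)) ∧ i < k ∧ Good prices k i) →
    Out prices k save ans →
    Stk (popA prices[k]! (k : Int) save ans).1 ∧
    (∀ e ∈ (popA prices[k]! (k : Int) save ans).1,
      ∃ i : Nat, e = (prices[i]!, (i : Int)) ∧ i < k ∧ Good prices (k+1) i ∧ prices[i]! ≤ prices[k]!) ∧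
    Out prices k (popA prices[k]! (k : Int) save ans).1 (popA prices[k]! (k : Int) save ans).2 := by
  intro save
  induction save with
  | nil => intro ans _ _ hout; simpa [popA, Stk] using hout
  | cons hd rest ih =>
    intro ans hstk hent hout
    obtain ⟨p, i0⟩ := hd
    obtain ⟨i, hei, hik, hgood⟩ := hent (p, i0) (by simp)
    have hp : p = prices[i]! := by simpa using congrArg Prod.fst hei
    have hi0 : i0 = (i : Int) := by simpa using congrArg Prod.snd hei
    by_cases hle : p ≤ prices[k]!
    · -- keep the whole stack
      have hres : popA prices[k]! (k : Int) ((p,i0) :: rest) ans = ((p,i0) :: rest, ans) := by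
        rw [show popA prices[k]! (k : Int) ((p,i0) :: rest) ans
          = if p ≤ prices[k]! then ((p,i0) :: rest, ans)
            else popA prices[k]! (k : Int) rest (ans.set i0.toNat ((k : Int) - i0)) from rfl,
          if_pos hle]
      rw [hres]
      refine ⟨hstk, ?_, hout⟩
      intro e he
      obtain ⟨j, hej, hjk, hgj⟩ := hent e he
      refine ⟨j, hej, hjk, ?_, ?_⟩
      · -- Good (k+1): new index k is fine since prices[j]! ≤ prices[k]!
        have hejle : e.1 ≤ prices[k]! := by
          rcases (List.mem_cons.mp he) with h | h
          · rw [h]; exact hle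
          · have := (List.pairwise_cons.mp hstk).1 e h
            exact le_trans this.1 hle
        have hj1 : prices[j]! ≤ prices[k]! := by
          have : e.1 = prices[j]! := by simpa using congrArg Prod.fst hej
          rwa [this] at hejle
        intro m him hmk1
        by_cases hmk : m < k
        · exact hgj m him hmk
        · have : m = k := by omega
          rw [this]; exact hj1
      · have hfst : e.1 = prices[j]! := by simpa using congrArg Prod.fst hej
        rw [← hfst]
        rcases (List.mem_cons.mp he) with h | h
        · rw [h]; exact hle
        · exact le_trans ((List.pairwise_cons.mp hstk).1 e h).1 hle
    · -- pop (p, i0), set answer, recurse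
      have hres : popA prices[k]! (k : Int) ((p,i0) :: rest) ans
          = popA prices[k]! (k : Int) rest (ans.set i0.toNat ((k : Int) - i0)) := by
        rw [show popA prices[k]! (k : Int) ((p,i0) :: rest) ans
          = if p ≤ prices[k]! then ((p,i0) :: rest, ans)
            else popA prices[k]! (k : Int) rest (ans.set i0.toNat ((k : Int) - i0)) from rfl,
          if_neg hle]
      rw [hres]
      have hd : prices[k]! < prices[i]! := by rw [hp] at hle; omega
      have hexp : expected prices i = (k : Int) - (i : Int) := expected_found hik hk hgood hd
      have htn : i0.toNat = i := by rw [hi0]; simp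
      have hnotmem : (i : Int) ∉ rest.map Prod.snd := by
        intro hmem
        obtain ⟨e, he, hesnd⟩ := List.mem_map.mp hmem
        have := (List.pairwise_cons.mp hstk).1 e he
        rw [hi0, hesnd] at this
        omega
      apply ih
      · exact (List.pairwise_cons.mp hstk).2
      · intro e he; exact hent e (by simp [he])
      · constructor
        · simp [List.length_set, hout.1]
        · intro j hj
          by_cases hji : j = i
          · subst hji
            rw [htn, List.getElem?_set_self (by rw [hout.1]; exact hj)]
            rw [if_neg (not_or.mpr ⟨hnotmem, by omega⟩), hexp, hi0]
          · rw [htn, List.getElem?_set_ne (by omega)]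
            rw [hout.2 j hj]
            refine if_congr ?_ rfl rfl
            simp only [List.map_cons, List.mem_cons, hi0]
            constructor <;> intro h
            · rcases h with (h | h) | h
              · exfalso; exact hji (by exact_mod_cast h)
              · exact Or.inl h
              · exact Or.inr h
            · rcases h with h | h
              · exact Or.inl (Or.inr h)
              · exact Or.inr h

theorem mainA_spec (prices : List Int) :
    ∀ (fuel k : Nat) (save : List (Int × Int)) (ans : List Int),
    prices.length - k = fuel → k ≤ prices.length →
    Stk save →
    (∀ e ∈ save, ∃ i : Nat, e = (prices[i]!, (i : Int)) ∧ i < k ∧ Good prices k i) →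
    Out prices k save ans →
    Stk (mainA (withIdx k (prices.drop k)) save ans).1 ∧
    (∀ e ∈ (mainA (withIdx k (prices.drop k)) save ans).1,
      ∃ i : Nat, e = (prices[i]!, (i : Int)) ∧ i < prices.length ∧ Good prices prices.length i) ∧
    Out prices prices.length (mainA (withIdx k (prices.drop k)) save ans).1
        (mainA (withIdx k (prices.drop k)) save ans).2 := by
  intro fuel
  induction fuel with
  | zero =>
    intro k save ans hfuel hkle hstk hent hout
    have hk : k = prices.length := by omega
    subst hk
    simp only [List.drop_length, withIdx, mainA]
    exact ⟨hstk, hent, hout⟩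
  | succ m ihm =>
    intro k save ans hfuel hkle hstk hent hout
    have hk : k < prices.length := by omega
    rw [List.drop_eq_getElem_cons hk]
    simp only [withIdx, mainA]
    rw [← getbang_eq hk]
    obtain ⟨hstk', hent', hout'⟩ := popA_spec hk save ans hstk hent hout
    set P := popA prices[k]! (k : Int) save ans with hP
    have hnewstk : Stk ((prices[k]!, (k : Int)) :: P.1) := by
      apply List.pairwise_cons.mpr
      refine ⟨?_, hstk'⟩
      intro b hb
      obtain ⟨i, hei, hik, _, hle⟩ := hent' b hb
      constructor
      · have : b.1 = prices[i]! := by simpa using congrArg Prod.fst hei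
        rw [this]; exact hle
      · have : b.2 = (i : Int) := by simpa using congrArg Prod.snd hei
        rw [this]; omega
    have hnewent : ∀ e ∈ (prices[k]!, (k : Int)) :: P.1,
        ∃ i : Nat, e = (prices[i]!, (i : Int)) ∧ i < k + 1 ∧ Good prices (k+1) i := by
      intro e he
      rcases List.mem_cons.mp he with h | h
      · exact ⟨k, h, by omega, fun m h1 h2 => by omega⟩
      · obtain ⟨i, hei, hik, hg, _⟩ := hent' e h
        exact ⟨i, hei, by omega, hg⟩
    have hnewout : Out prices (k+1) ((prices[k]!, (k : Int)) :: P.1) P.2 := by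
      refine ⟨hout'.1, ?_⟩
      intro j hj
      rw [hout'.2 j hj]
      refine (if_congr ?_ rfl rfl).symm
      simp only [List.map_cons, List.mem_cons]
      by_cases hjk : j = k
      · subst hjk; simp
      · constructor <;> intro h
        · rcases h with (h | h) | h
          · exfalso; exact hjk (by exact_mod_cast h)
          · exact Or.inl h
          · right; omega
        · rcases h with h | h
          · exact Or.inl (Or.inr h)
          · right; omega
    have := ihm (k+1) ((prices[k]!, (k : Int)) :: P.1) P.2 (by omega) (by omega)
      hnewstk hnewent hnewout
    exact this

theorem flushA_spec (prices : List Int) :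
    ∀ (save : List (Int × Int)) (ans : List Int),
    Stk save →
    (∀ e ∈ save, ∃ i : Nat, e = (prices[i]!, (i : Int)) ∧ i < prices.length ∧ Good prices prices.length i) →
    Out prices prices.length save ans →
    (flushA ((prices.length : Int) - 1) save ans).length = prices.length ∧
    ∀ i : Nat, i < prices.length →
      (flushA ((prices.length : Int) - 1) save ans)[i]? = some (expected prices i) := by
  intro save
  induction save with
  | nil =>
    intro ans _ _ hout
    simp only [flushA]
    refine ⟨hout.1, ?_⟩
    intro i hi
    have := hout.2 i hi
    rwa [if_neg (not_or.mpr ⟨by simp, by omega⟩)] at this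
  | cons hd rest ih =>
    intro ans hstk hent hout
    obtain ⟨p, i0⟩ := hd
    obtain ⟨i, hei, hik, hgood⟩ := hent (p, i0) (by simp)
    have hi0 : i0 = (i : Int) := by simpa using congrArg Prod.snd hei
    have htn : i0.toNat = i := by rw [hi0]; simp
    have hexp : expected prices i = (prices.length : Int) - 1 - (i : Int) :=
      expected_none hik hgood
    have hnotmem : (i : Int) ∉ rest.map Prod.snd := by
      intro hmem
      obtain ⟨e, he, hesnd⟩ := List.mem_map.mp hmem
      have := (List.pairwise_cons.mp hstk).1 e he
      rw [hi0, hesnd] at this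
      omega
    simp only [flushA]
    apply ih
    · exact (List.pairwise_cons.mp hstk).2
    · intro e he; exact hent e (by simp [he])
    · constructor
      · simp [List.length_set, hout.1]
      · intro j hj
        by_cases hji : j = i
        · subst hji
          rw [htn, List.getElem?_set_self (by rw [hout.1]; exact hj)]
          rw [if_neg (not_or.mpr ⟨hnotmem, by omega⟩), hexp, hi0]
        · rw [htn, List.getElem?_set_ne (by omega)]
          rw [hout.2 j hj]
          refine if_congr ?_ rfl rfl
          simp only [List.map_cons, List.mem_cons, hi0]
          constructor <;> intro h
          · rcases h with (h | h) | h
            · exfalso; exact hji (by exact_mod_cast h)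
            · exact Or.inl h
            · exact Or.inr h
          · rcases h with h | h
            · exact Or.inl (Or.inr h)
            · exact Or.inr h

-- characterisation of A's result
theorem solution_char (prices : List Int) :
    (solution prices).length = prices.length ∧
    ∀ i : Nat, i < prices.length → (solution prices)[i]? = some (expected prices i) := by
  have hinit : Out prices 0 [] (List.replicate prices.length 0) := by
    refine ⟨by simp, ?_⟩
    intro i hi
    simp [hi]
  have hmain := mainA_spec prices (prices.length - 0) 0 [] (List.replicate prices.length 0)
    rfl (by omega) (by simp [Stk]) (by simp) hinit
  have hflush := flushA_spec prices _ _ hmain.1 hmain.2.1 hmain.2.2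
  simpa [solution, List.drop_zero] using hflush

-- characterisation of B's result
theorem alt_length : ∀ (l : List Int), (solution_alt l).length = l.length := by
  intro l
  induction l with
  | nil => simp [solution_alt]
  | cons p rest ih => simp [solution_alt, ih]

theorem alt_char : ∀ (l : List Int) (i : Nat), i < l.length →
    (solution_alt l)[i]? = some (expected l i) := by
  intro l
  induction l with
  | nil => intro i hi; simp at hi
  | cons p rest ih =>
    intro i hi
    cases i with
    | zero =>
      simp [solution_alt, expected]
    | succ i' =>
      have hi' : i' < rest.length := by simpa using hi
      have hexp : expected (p :: rest) (i' + 1) = expected rest i' := by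
        unfold expected
        rw [getbang_eq (show i'+1 < (p::rest).length by simp; omega), getbang_eq hi',
          List.getElem_cons_succ, List.drop_succ_cons]
      simp only [solution_alt, List.getElem?_cons_succ, hexp]
      exact ih i' hi'

-- ===== VERDICT (by name: the statement is the Claim_ definition above) =====
theorem solution_spec : Claim_equal_solution := by
  intro prices _
  unfold Spec_solution
  obtain ⟨hlen, hget⟩ := solution_char prices
  apply List.ext_getElem?
  intro i
  by_cases hi : i < prices.length
  · rw [hget i hi, alt_char prices i hi]
  · rw [List.getElem?_eq_none (by omega), List.getElem?_eq_none (by rw [alt_length]; omega)]
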